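-- pv_equiv track=rewrite | github.com/mrunmayeejog/DS | DS_Problems/SubArrayWithSumZero.py | print_subarrays
-- ===== SOURCE A (Python) =====
-- def print_subarrays(arr):
--     op = []
--     for each in range(0, len(arr)):
--         sum = 0
--         sub_arr = []
--         for i in range(each, len(arr)):
--             sum += arr[i]
--             sub_arr.append(arr[i])
--             if sum == 0:
--                 op.append(sub_arr)
--                 break
--     return op
-- ===== SOURCE B (Python) =====
-- def print_subarrays(arr):
--     # One backward pass over prefix sums: nxt maps a prefix-sum value to the
--     # smallest index k (> current start) where it occurs, so the shortest
--     # zero-sum subarray starting at s is arr[s:nxt[pref[s]]].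
--     n = len(arr)
--     pref = [0] * (n + 1)
--     for i in range(n):
--         pref[i + 1] = pref[i] + arr[i]
--     nxt = {}
--     res_rev = []
--     for s in range(n - 1, -1, -1):
--         nxt[pref[s + 1]] = s + 1
--         k = nxt.get(pref[s])
--         if k is not None:
--             res_rev.append(arr[s:k])
--     return res_rev[::-1]
-- ===== Notes on version B (the rewrite author's own statement) =====
-- stated objective: faster
-- what changed: A rescans the array from every start index to find the first zero-sum subarray; B computes prefix sums once and makes one backward pass with a dict mapping each prefix-sum value to its nearest later index, slicing arr[s:nxt[pref[s]]] directly.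
import Mathlib
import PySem

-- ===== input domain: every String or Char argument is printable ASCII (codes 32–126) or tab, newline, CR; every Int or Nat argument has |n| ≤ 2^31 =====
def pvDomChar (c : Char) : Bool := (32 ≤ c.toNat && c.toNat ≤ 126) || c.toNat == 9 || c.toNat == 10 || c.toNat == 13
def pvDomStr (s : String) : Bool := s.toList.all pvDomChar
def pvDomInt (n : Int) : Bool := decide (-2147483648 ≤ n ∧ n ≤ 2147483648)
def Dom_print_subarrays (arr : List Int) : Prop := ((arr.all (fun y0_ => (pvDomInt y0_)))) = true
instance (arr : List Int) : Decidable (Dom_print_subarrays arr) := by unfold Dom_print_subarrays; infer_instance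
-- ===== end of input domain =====

-- B replaces A's fresh scan per start index by prefix sums and one backward pass keeping a
-- dict from prefix-sum value to its nearest later index (objective: faster).

-- ===== PORT A =====
-- A's inner loop: remaining indices i, running sum, accumulated sub_arr; 'some' = break+append
def innerA (arr : List Int) : List Int → Int → List Int → Option (List Int)
  | [], _, _ => none
  | i :: rest, sum, sub =>
    let sum' := sum + PySem.List.pyGetD arr i 0
    let sub' := sub ++ [PySem.List.pyGetD arr i 0]
    if sum' = 0 then some sub' else innerA arr rest sum' sub'

def print_subarrays (arr : List Int) : List (List Int) :=
  (PySem.List.pyRange 0 (arr.length : Int) 1).foldl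
    (fun op each =>
      match innerA arr (PySem.List.pyRange each (arr.length : Int) 1) 0 [] with
      | some s => op ++ [s]
      | none => op) []

-- ===== PORT B =====
-- pref[i+1] = pref[i] + arr[i], built left to right (the pair carries the list and pref[i])
def prefB (arr : List Int) : List Int :=
  (arr.foldl (fun (st : List Int × Int) x => (st.1 ++ [st.2 + x], st.2 + x)) ([0], 0)).1

-- backward loop over starts s: nxt[pref[s+1]] = s+1, then look up pref[s] (nxt' inlined)
def loopB (pref : List Int) (arr : List Int) :
    List Int → PySem.Dict Int Int → List (List Int) → List (List Int)
  | [], _, res => res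
  | s :: rest, nxt, res =>
    match (nxt.insert (PySem.List.pyGetD pref (s + 1) 0) (s + 1)).get?
        (PySem.List.pyGetD pref s 0) with
    | some k => loopB pref arr rest (nxt.insert (PySem.List.pyGetD pref (s + 1) 0) (s + 1))
        (res ++ [PySem.List.slice arr (some s) (some k)])
    | none => loopB pref arr rest (nxt.insert (PySem.List.pyGetD pref (s + 1) 0) (s + 1)) res

def print_subarrays_alt (arr : List Int) : List (List Int) :=
  -- res_rev[::-1] is List.reverse (PySem.List.slice?_none_none_neg_one)
  (loopB (prefB arr) arr (PySem.List.pyRange ((arr.length : Int) - 1) (-1) (-1))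
    PySem.Dict.empty []).reverse

-- ===== PRECONDITION & SPEC =====
def Spec_print_subarrays (arr : List Int) (out : List (List Int)) : Prop := out = print_subarrays_alt arr
instance (arr : List Int) (out : List (List Int)) : Decidable (Spec_print_subarrays arr out) := by unfold Spec_print_subarrays; infer_instance

-- ===== CLAIM (what is proved, stated in full; the proofs are below) =====
def Claim_equal_print_subarrays : Prop := ∀ (arr : List Int), Dom_print_subarrays arr → Spec_print_subarrays arr (print_subarrays arr)

-- ===== LEMMAS AND PROOFS =====

-- prefix sum: P arr k = sum of the first k elements
def P (arr : List Int) (k : Nat) : Int := (arr.take k).sum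

-- F arr j v = first index k in [j, arr.length] with P arr k = v, as an Int
def F (arr : List Int) (j : Nat) (v : Int) : Option Int :=
  ((List.range' j (arr.length + 1 - j)).find? (fun k => decide (P arr k = v))).map
    (fun k => (k : Int))

-- the common normal form both programs are reduced to
def common (arr : List Int) : List (List Int) :=
  (List.range arr.length).filterMap
    (fun t => (F arr (t + 1) (P arr t)).map
      (fun k => (arr.drop t).take (k.toNat - t)))

lemma innerA_spec (arr : List Int) : ∀ (cnt j : Nat), j + cnt = arr.length →
    ∀ (v : Int) (sub : List Int),
    innerA arr (PySem.List.pyRange (j : Int) (arr.length : Int) 1) (P arr j - v) sub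
      = (F arr (j + 1) v).map (fun k => sub ++ (arr.drop j).take (k.toNat - j)) := by
  intro cnt
  induction cnt with
  | zero =>
    intro j hj v sub
    rw [PySem.List.pyRange_one_eq_nil (by omega)]
    have h0 : arr.length + 1 - (j + 1) = 0 := by omega
    unfold F
    rw [h0]
    simp [innerA]
  | succ c ih =>
    intro j hj v sub
    have hjlt : j < arr.length := by omega
    rw [PySem.List.pyRange_one_cons (by exact_mod_cast hjlt)]
    show innerA arr (↑j :: PySem.List.pyRange (↑j + 1) ↑arr.length) (P arr j - v) sub = _
    rw [show ((j : Int) + 1) = ((j + 1 : Nat) : Int) by push_cast; ring]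
    simp only [innerA, PySem.List.pyGetD_natCast, List.getD_eq_getElem?_getD,
      List.getElem?_eq_getElem hjlt, Option.getD_some]
    have hsum : P arr j - v + arr[j] = P arr (j + 1) - v := by
      simp [P, List.sum_take_succ arr j hjlt]; ring
    rw [hsum]
    have hrange : List.range' (j + 1) (arr.length + 1 - (j + 1))
        = (j + 1) :: List.range' (j + 2) (arr.length + 1 - (j + 2)) := by
      rw [show arr.length + 1 - (j + 1) = (arr.length + 1 - (j + 2)) + 1 by omega,
        List.range'_succ]
    by_cases h0 : P arr (j + 1) - v = 0
    · have hPv : P arr (j + 1) = v := by omega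
      rw [if_pos h0]
      unfold F
      rw [hrange, List.find?_cons]
      have htake : List.take 1 (List.drop j arr) = [arr[j]] := by
        rw [List.drop_eq_getElem_cons hjlt]; rfl
      simp [hPv, htake, show j + 1 - j = 1 from by omega]
    · have hPv : (P arr (j + 1) = v) = False := by simp; omega
      rw [if_neg h0, ih (j + 1) (by omega) v (sub ++ [arr[j]])]
      have hF : F arr (j + 1) v = F arr (j + 2) v := by
        unfold F
        rw [hrange, List.find?_cons]
        simp [hPv]
      rw [hF]
      unfold F
      cases hfind : List.find? (fun k => decide (P arr k = v))
          (List.range' (j + 2) (arr.length + 1 - (j + 2))) with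
      | none => simp
      | some k' =>
        have hmem := List.mem_of_find?_eq_some hfind
        rw [List.mem_range'] at hmem
        obtain ⟨i, hi, rfl⟩ := hmem
        have htk : List.take (j + 2 + i - j) (List.drop j arr)
            = arr[j] :: List.take (j + 2 + i - (j + 1)) (List.drop (j + 1) arr) := by
          rw [List.drop_eq_getElem_cons hjlt,
            show j + 2 + i - j = (j + 2 + i - (j + 1)) + 1 by omega,
            List.take_succ_cons]
        simp [show ((j : Int) + 2 + (i : Int)).toNat = j + 2 + i from by omega, htk]

lemma foldl_opt (g : Int → Option (List Int)) : ∀ (l : List Int) (init : List (List Int)),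
    l.foldl (fun op each => match g each with | some s => op ++ [s] | none => op) init
      = init ++ l.filterMap g := by
  intro l
  induction l with
  | nil => simp
  | cons x xs ih =>
    intro init
    simp only [List.foldl_cons, List.filterMap_cons]
    cases hg : g x with
    | none => simp [ih]
    | some s => simp [ih]

lemma A_eq_common (arr : List Int) : print_subarrays arr = common arr := by
  unfold print_subarrays
  rw [foldl_opt (fun each => innerA arr (PySem.List.pyRange each (arr.length : Int) 1) 0 [])]
  rw [List.nil_append, PySem.List.pyRange_zero_nat, List.filterMap_map]
  unfold common
  apply List.filterMap_congr
  intro t ht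
  rw [List.mem_range] at ht
  show innerA arr (PySem.List.pyRange (t : Int) (arr.length : Int) 1) 0 [] = _
  rw [show (0 : Int) = P arr t - P arr t by ring,
    innerA_spec arr (arr.length - t) t (by omega) (P arr t) []]
  simp

lemma prefB_pair (arr : List Int) :
    arr.foldl (fun (st : List Int × Int) x => (st.1 ++ [st.2 + x], st.2 + x)) ([0], 0)
      = ((List.range (arr.length + 1)).map (fun k => P arr k), arr.sum) := by
  induction arr using List.reverseRecOn with
  | nil => simp [P]
  | append_singleton xs x ih =>
    rw [List.foldl_append, ih]
    simp only [List.foldl_cons, List.foldl_nil]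
    refine Prod.ext ?_ (by simp)
    simp only [List.length_append, List.length_singleton]
    conv_rhs => rw [List.range_succ, List.map_append]
    congr 1
    · apply List.map_congr_left
      intro k hk
      simp only [List.mem_range] at hk
      simp [P, List.take_append_of_le_length (by omega : k ≤ xs.length)]
    · simp [P]

lemma prefB_eq (arr : List Int) : prefB arr = (List.range (arr.length + 1)).map (P arr) := by
  unfold prefB
  rw [prefB_pair]

lemma prefB_get (arr : List Int) (k : Nat) (hk : k ≤ arr.length) :
    PySem.List.pyGetD (prefB arr) (k : Int) 0 = P arr k := by
  rw [prefB_eq, PySem.List.pyGetD_natCast, PySem.List.getD_map_range _ _ _ _ (by omega)]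

lemma loopB_spec (arr : List Int) : ∀ (s : Nat), s ≤ arr.length →
    ∀ (nxt : PySem.Dict Int Int) (res : List (List Int)),
    (∀ v, nxt.get? v = F arr (s + 1) v) →
    loopB (prefB arr) arr (PySem.List.pyRange ((s : Int) - 1) (-1) (-1)) nxt res
      = res ++ ((List.range s).reverse.filterMap
          (fun t => (F arr (t + 1) (P arr t)).map
            (fun k => (arr.drop t).take (k.toNat - t)))) := by
  intro s
  induction s with
  | zero =>
    intro _ nxt res _
    rw [PySem.List.pyRange_neg_one_eq_nil (by omega)]
    simp [loopB]
  | succ s ih =>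
    intro hs nxt res hinv
    rw [show (((s + 1 : Nat) : Int) - 1) = (s : Int) by push_cast; ring]
    rw [PySem.List.pyRange_neg_one_cons (by omega)]
    show loopB (prefB arr) arr ((s : Int) :: _) nxt res = _
    unfold loopB
    have hget1 : PySem.List.pyGetD (prefB arr) ((s : Int) + 1) 0 = P arr (s + 1) := by
      rw [show ((s : Int) + 1) = ((s + 1 : Nat) : Int) by push_cast; ring]
      exact prefB_get arr (s + 1) (by omega)
    have hget0 : PySem.List.pyGetD (prefB arr) ((s : Int)) 0 = P arr s :=
      prefB_get arr s (by omega)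
    have hrange : List.range' (s + 1) (arr.length + 1 - (s + 1))
        = (s + 1) :: List.range' (s + 2) (arr.length + 1 - (s + 2)) := by
      rw [show arr.length + 1 - (s + 1) = (arr.length + 1 - (s + 2)) + 1 by omega,
        List.range'_succ]
    have hinv' : ∀ v, (nxt.insert (P arr (s + 1)) ((s : Int) + 1)).get? v = F arr (s + 1) v := by
      intro v
      rw [PySem.Dict.get?_insert]
      unfold F
      rw [hrange, List.find?_cons]
      by_cases hv : v = P arr (s + 1)
      · subst hv
        simp [Option.map]
      · have : (P arr (s + 1) = v) = False := by simp [Ne.symm hv]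
        simp only [this, decide_false]
        rw [if_neg hv, hinv v]
        rfl
    rw [hget1, hget0, hinv' (P arr s)]
    have hsplit : (List.range (s + 1)).reverse = s :: (List.range s).reverse := by
      rw [List.range_succ, List.reverse_append]; rfl
    rw [hsplit, List.filterMap_cons]
    cases hF : F arr (s + 1) (P arr s) with
    | none =>
      exact ih (by omega) _ res hinv'
    | some k =>
      simp only [Option.map_some]
      have hk : ∃ k' : Nat, k = (k' : Int) ∧ s + 1 ≤ k' := by
        unfold F at hF
        cases hfind : List.find? (fun k => decide (P arr k = P arr s))
            (List.range' (s + 1) (arr.length + 1 - (s + 1))) with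
        | none => rw [hfind] at hF; simp at hF
        | some k'' =>
          rw [hfind] at hF
          have hmem := List.mem_of_find?_eq_some hfind
          rw [List.mem_range'] at hmem
          obtain ⟨i, _, rfl⟩ := hmem
          refine ⟨s + 1 + 1 * i, ?_, by omega⟩
          simp at hF
          omega
      obtain ⟨k', rfl, hk'⟩ := hk
      have hslice : PySem.List.slice arr (some (s : Int)) (some (k' : Int))
          = (arr.drop s).take (k' - s) := PySem.List.slice_natCast arr s k'
      rw [hslice, ih (by omega) _ _ hinv']
      simp

lemma B_eq_common (arr : List Int) : print_subarrays_alt arr = common arr := by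
  show (loopB (prefB arr) arr (PySem.List.pyRange ((arr.length : Int) - 1) (-1) (-1))
    PySem.Dict.empty []).reverse = common arr
  rw [loopB_spec arr arr.length (le_refl _) PySem.Dict.empty []
    (by
      intro v
      rw [PySem.Dict.get?_empty]
      unfold F
      rw [show arr.length + 1 - (arr.length + 1) = 0 from by omega]
      simp)]
  rw [List.nil_append, ← List.filterMap_reverse, List.reverse_reverse]
  rfl

-- ===== VERDICT (by name: the statement is the Claim_ definition above) =====
theorem print_subarrays_spec : Claim_equal_print_subarrays := by
  intro arr _
  unfold Spec_print_subarrays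
  rw [A_eq_common, B_eq_common]
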